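-- pv_equiv track=rewrite | github.com/VarshaAggarwal16/more-algorithms | highestFrequencyChar.py | highestFrequencyChar
-- ===== SOURCE A (Python) =====
-- def highestFrequencyChar(value : str):
--     value1 = value.replace(" ", "")
--     charFrquency = {}
--     for char in value1:
--         charFrquency[char] = charFrquency.get(char,0) +1
--     max_freq = max(charFrquency.values())
--     for char in value1:
--         if charFrquency[char] == max_freq:
--             return char
-- ===== SOURCE B (Python) =====
-- def highestFrequencyChar(value: str):
--     value1 = value.replace(" ", "")
--     # No frequency table at all: max over the characters of the stripped
--     # string keyed by their occurrence count.  max returns the FIRST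
--     # element attaining the maximal key, i.e. the first char (in string
--     # order) with the highest frequency -- exactly A's answer.  On an
--     # all-space input max() raises ValueError, just like A's max().
--     return max(value1, key=value1.count)
-- ===== Notes on version B (the rewrite author's own statement) =====
-- stated objective: simpler
-- what changed: B builds no frequency dictionary at all: it takes max over the space-stripped string itself keyed by str.count, so A's counting pass, max-of-values pass and rescan collapse into one max-by-key over the characters (at the price of O(n^2) counting).
import Mathlib
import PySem

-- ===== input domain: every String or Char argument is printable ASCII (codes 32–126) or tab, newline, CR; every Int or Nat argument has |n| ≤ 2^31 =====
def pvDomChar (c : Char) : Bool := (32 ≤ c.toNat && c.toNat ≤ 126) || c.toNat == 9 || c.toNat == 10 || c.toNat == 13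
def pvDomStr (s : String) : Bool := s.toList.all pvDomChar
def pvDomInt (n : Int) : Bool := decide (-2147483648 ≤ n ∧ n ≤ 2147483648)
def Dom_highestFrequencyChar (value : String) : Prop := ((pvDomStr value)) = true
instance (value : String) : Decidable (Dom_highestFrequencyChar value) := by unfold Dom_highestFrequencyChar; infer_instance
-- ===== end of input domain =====

-- B builds no frequency dictionary: it takes max over the space-stripped string itself
-- keyed by str.count, collapsing A's three passes into one max-by-key; simpler, not faster.

-- ===== PORT A =====
def highestFrequencyChar (value : String) : String :=
  let value1 := (PySem.Str.replace value " " "").toList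
  let charFrquency : PySem.Dict Char Int :=
    value1.foldl (fun d c => d.insert c (d.getD c 0 + 1)) PySem.Dict.empty
  match PySem.List.max? charFrquency.values (fun v => v) with
  | none => ""            -- Python: max() of the empty values raises ValueError; excluded by Pre_
  | some maxFreq =>
    match value1.find? (fun c => charFrquency.getD c 0 == maxFreq) with
    | some c => String.ofList [c]   -- d[c] ported as getD: c ∈ value1, so the key is present (exact)
    | none => ""                -- loop falls through (Python would return None); unreachable when value1 ≠ []

-- ===== PORT B =====
def highestFrequencyChar_alt (value : String) : String :=
  let value1 := (PySem.Str.replace value " " "").toList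
  -- max(value1, key=value1.count): first char attaining the maximal count;
  -- str.count of a single character ported as List.count (exact)
  match PySem.List.max? value1 (fun c => (value1.count c : Int)) with
  | some c => String.ofList [c]
  | none => ""            -- Python: max() of the empty string raises ValueError; excluded by Pre_

-- ===== PRECONDITION & SPEC =====
-- Pre_ excludes exactly the inputs consisting only of spaces, on which both A's and B's
-- Python raise ValueError (max() over an empty sequence).
def Pre_highestFrequencyChar (value : String) : Prop :=
  (value.toList.any (fun c => !(c == ' '))) = true
instance (value : String) : Decidable (Pre_highestFrequencyChar value) := by
  unfold Pre_highestFrequencyChar; infer_instance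
def pvWitness_highestFrequencyChar : String := "ab"

def Spec_highestFrequencyChar (value : String) (out : String) : Prop := out = highestFrequencyChar_alt value
instance (value : String) (out : String) : Decidable (Spec_highestFrequencyChar value out) := by unfold Spec_highestFrequencyChar; infer_instance

-- ===== CLAIM (what is proved, stated in full; the proofs are below) =====
def Claim_equal_highestFrequencyChar : Prop := ∀ (value : String), Dom_highestFrequencyChar value → Pre_highestFrequencyChar value → Spec_highestFrequencyChar value (highestFrequencyChar value)

-- ===== LEMMAS AND PROOFS =====

-- the replace(" ", "") pass is the no-space filter
lemma pv_go_filter : ∀ (fuel : Nat) (l acc : List Char), l.length ≤ fuel →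
    PySem.Chars.replace.go [' '] [] fuel l acc
      = acc.reverse ++ l.filter (fun c => !(c == ' ')) := by
  intro fuel
  induction fuel with
  | zero =>
    intro l acc h
    have : l = [] := List.eq_nil_of_length_eq_zero (Nat.le_zero.mp h)
    subst this; simp [PySem.Chars.replace.go]
  | succ n ih =>
    intro l acc h
    cases l with
    | nil => simp [PySem.Chars.replace.go]
    | cons c t =>
      by_cases hc : c = ' '
      · subst hc
        rw [show PySem.Chars.replace.go [' '] [] (n+1) (' ' :: t) acc
              = PySem.Chars.replace.go [' '] [] n t acc by
            simp [PySem.Chars.replace.go, List.isPrefixOf]]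
        rw [ih t acc (by simpa using Nat.le_of_succ_le_succ h)]
        simp
      · rw [show PySem.Chars.replace.go [' '] [] (n+1) (c :: t) acc
              = PySem.Chars.replace.go [' '] [] n t (c :: acc) by
            simp only [PySem.Chars.replace.go, List.isPrefixOf, Bool.and_true]
            rw [if_neg (by simp only [beq_iff_eq]; exact fun h => hc (Eq.symm h))]]
        rw [ih t (c :: acc) (by simpa using Nat.le_of_succ_le_succ h)]
        simp [hc]

lemma pv_replace_filter (value : String) :
    (PySem.Str.replace value " " "").toList
      = value.toList.filter (fun c => !(c == ' ')) := by
  rw [PySem.Str.toList_replace]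
  show PySem.Chars.replace value.toList [' '] [] = _
  rw [show PySem.Chars.replace value.toList [' '] []
        = PySem.Chars.replace.go [' '] [] value.toList.length value.toList [] by
      simp [PySem.Chars.replace]]
  simpa using pv_go_filter value.toList.length value.toList [] (Nat.le_refl _)

-- the counting loop is the Counter
lemma pv_fold_counter (l : List Char) :
    l.foldl (fun d c => d.insert c (d.getD c 0 + 1)) (PySem.Dict.empty : PySem.Dict Char Int)
      = PySem.Dict.counter l := rfl

-- the running-max step of PySem.List.max?
def pvStep {α : Type} (g : α → Int) : Option α → α → Option α :=
  fun acc x => match acc with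
  | none => some x
  | some m => if g m < g x then some x else some m

lemma pv_max?_eq_foldl {α : Type} (xs : List α) (g : α → Int) :
    PySem.List.max? xs g = xs.foldl (pvStep g) none := rfl

lemma pv_foldl_some {α : Type} (g : α → Int) :
    ∀ (t : List α) (a : α), ∃ r, t.foldl (pvStep g) (some a) = some r := by
  intro t
  induction t with
  | nil => intro a; exact ⟨a, rfl⟩
  | cons z t ih =>
    intro a
    by_cases h : g a < g z
    · simpa [pvStep, h] using ih z
    · simpa [pvStep, h] using ih a

lemma pv_foldl_stay {α : Type} (g : α → Int) :
    ∀ (t : List α) (a : α), (∀ y ∈ t, g y ≤ g a) → t.foldl (pvStep g) (some a) = some a := by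
  intro t
  induction t with
  | nil => intro a _; rfl
  | cons z t ih =>
    intro a h
    have hz : ¬ g a < g z := not_lt.mpr (h z (by simp))
    simp only [List.foldl_cons, pvStep, if_neg hz]
    exact ih a (fun y hy => h y (by simp [hy]))

lemma pv_foldl_swap {α : Type} (g : α → Int) :
    ∀ (t : List α) (a b : α), g b ≤ g a → (∃ y ∈ t, g a < g y) →
      t.foldl (pvStep g) (some a) = t.foldl (pvStep g) (some b) := by
  intro t
  induction t with
  | nil => intro a b _ h; rcases h with ⟨y, hy, _⟩; simp at hy
  | cons z t ih =>
    intro a b hba ⟨y, hy, hay⟩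
    by_cases haz : g a < g z
    · have hbz : g b < g z := lt_of_le_of_lt hba haz
      simp only [List.foldl_cons, pvStep, if_pos haz, if_pos hbz]
    · have hy' : y ∈ t := by
        rcases List.mem_cons.mp hy with h | h
        · exact absurd (h ▸ hay) haz
        · exact h
      by_cases hbz : g b < g z
      · simp only [List.foldl_cons, pvStep, if_neg haz, if_pos hbz]
        exact ih a z (not_lt.mp haz) ⟨y, hy', hay⟩
      · simp only [List.foldl_cons, pvStep, if_neg haz, if_neg hbz]
        exact ih a b hba ⟨y, hy', hay⟩

lemma pv_foldl_drop {α : Type} (g : α → Int) :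
    ∀ (t : List α) (x : α), (∃ y ∈ t, g x < g y) →
      t.foldl (pvStep g) (some x) = t.foldl (pvStep g) none := by
  intro t
  induction t with
  | nil => intro x h; rcases h with ⟨y, hy, _⟩; simp at hy
  | cons z t ih =>
    intro x ⟨y, hy, hxy⟩
    by_cases hxz : g x < g z
    · simp only [List.foldl_cons, pvStep, if_pos hxz]
    · have hy' : y ∈ t := by
        rcases List.mem_cons.mp hy with h | h
        · exact absurd (h ▸ hxy) hxz
        · exact h
      simp only [List.foldl_cons, pvStep, if_neg hxz]
      exact pv_foldl_swap g t x z (not_lt.mp hxz) ⟨y, hy', hxy⟩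

-- max? with a key is the first element attaining the maximum key value
lemma pv_max?_eq_find? {α : Type} (g : α → Int) (m : Int) :
    ∀ (xs : List α), (∀ k ∈ xs, g k ≤ m) → (∃ k ∈ xs, g k = m) →
      PySem.List.max? xs g = xs.find? (fun k => g k == m) := by
  intro xs
  induction xs with
  | nil => intro _ h; rcases h with ⟨k, hk, _⟩; simp at hk
  | cons x t ih =>
    intro hle ⟨k, hk, hkm⟩
    rw [pv_max?_eq_foldl]
    by_cases hx : g x = m
    · have : t.foldl (pvStep g) (some x) = some x :=
        pv_foldl_stay g t x (fun y hy => hx ▸ hle y (by simp [hy]))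
      simp [pvStep, List.find?_cons, hx, this]
    · have hxlt : g x < m := lt_of_le_of_ne (hle x (by simp)) hx
      have hk' : k ∈ t := by
        rcases List.mem_cons.mp hk with h | h
        · exact absurd (h ▸ hkm) hx
        · exact h
      have hdrop : t.foldl (pvStep g) (some x) = t.foldl (pvStep g) none :=
        pv_foldl_drop g t x ⟨k, hk', hkm ▸ hxlt⟩
      have iht := ih (fun y hy => hle y (by simp [hy])) ⟨k, hk', hkm⟩
      rw [pv_max?_eq_foldl] at iht
      simp only [List.foldl_cons, pvStep, hdrop]
      rw [iht]
      simp [List.find?_cons, hx]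

-- find? only depends on the predicate's values on the list
lemma pv_find?_congr {α : Type} (p q : α → Bool) :
    ∀ (l : List α), (∀ x ∈ l, p x = q x) → l.find? p = l.find? q := by
  intro l
  induction l with
  | nil => intro _; rfl
  | cons x t ih =>
    intro h
    have hx := h x (by simp)
    by_cases hp : p x = true
    · simp [hp, hx ▸ hp]
    · have hp' : p x = false := by simpa using hp
      simp only [List.find?_cons, hp', hx ▸ hp']
      exact ih (fun y hy => h y (by simp [hy]))

-- ===== VERDICT (by name: the statement is the Claim_ definition above) =====
theorem highestFrequencyChar_spec : Claim_equal_highestFrequencyChar := by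
  intro value _ hpre
  unfold Spec_highestFrequencyChar
  set l := (PySem.Str.replace value " " "").toList with hl
  -- l is nonempty
  have hlne : l ≠ [] := by
    rw [hl, pv_replace_filter]
    intro hcon
    unfold Pre_highestFrequencyChar at hpre
    rcases List.any_eq_true.mp hpre with ⟨c, hc, hcs⟩
    exact (List.filter_eq_nil_iff.mp hcon c hc) hcs
  set d := PySem.Dict.counter l with hd
  have hkeys : d.keys = PySem.Set.ofList l := PySem.Dict.keys_counter l
  have hnodup : d.keys.Nodup := by
    rw [hkeys]; exact PySem.Set.nodup_ofList l
  have hvals : d.values = d.keys.map (fun k => d.getD k 0) :=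
    PySem.Dict.values_eq_map_keys d hnodup 0
  have hgetD : ∀ c : Char, d.getD c 0 = (l.count c : Int) := fun c =>
    PySem.Dict.getD_counter l c
  -- keys are nonempty
  have hkne : d.keys ≠ [] := by
    rcases List.exists_mem_of_ne_nil l hlne with ⟨c, hc⟩
    intro hcon
    have : c ∈ d.keys := by
      rw [hkeys]; exact (PySem.Set.mem_ofList l c).mpr hc
    simp [hcon] at this
  -- A's max over the values
  obtain ⟨m, hm⟩ : ∃ m, PySem.List.max? d.values (fun v => v) = some m := by
    cases h : PySem.List.max? d.values (fun v => v) with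
    | none =>
      have hvne : d.values ≠ [] := by
        rw [hvals]
        intro hcon
        exact hkne (List.map_eq_nil_iff.mp hcon)
      rcases List.exists_cons_of_ne_nil hvne with ⟨v, t, hvt⟩
      rcases pv_foldl_some (fun v => v) t v with ⟨r, hr⟩
      rw [pv_max?_eq_foldl, hvt] at h
      simp only [List.foldl_cons, pvStep] at h
      rw [hr] at h
      exact absurd h (by simp)
    | some m => exact ⟨m, rfl⟩
  have hmmem : m ∈ d.values := PySem.List.max?_mem hm
  -- m bounds, and is attained by, the counts of the characters of l
  have hmle : ∀ c ∈ l, (l.count c : Int) ≤ m := by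
    intro c hc
    have hck : c ∈ d.keys := by rw [hkeys]; exact (PySem.Set.mem_ofList l c).mpr hc
    have : d.getD c 0 ∈ d.values := by rw [hvals]; exact List.mem_map_of_mem hck
    have := PySem.List.max?_isMax hm _ this
    rwa [hgetD c] at this
  have hmex : ∃ c ∈ l, (l.count c : Int) = m := by
    rw [hvals] at hmmem
    rcases List.mem_map.mp hmmem with ⟨k, hk, hkm⟩
    have hkl : k ∈ l := by
      rw [hkeys] at hk; exact (PySem.Set.mem_ofList l k).mp hk
    exact ⟨k, hkl, by rw [← hgetD k]; exact hkm⟩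
  -- B's max over the characters of l is the first char attaining m
  have hB : PySem.List.max? l (fun c => (l.count c : Int))
      = l.find? (fun c => (l.count c : Int) == m) :=
    pv_max?_eq_find? _ m l hmle hmex
  -- the first attaining char exists
  obtain ⟨k, hk⟩ : ∃ k, l.find? (fun c => (l.count c : Int) == m) = some k := by
    rcases hmex with ⟨k0, hk0, hk0m⟩
    have hpk0 : ((l.count k0 : Int) == m) = true := by rw [hk0m]; exact beq_self_eq_true m
    have : (l.find? (fun c => (l.count c : Int) == m)).isSome :=
      List.find?_isSome.mpr ⟨k0, hk0, hpk0⟩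
    rcases Option.isSome_iff_exists.mp this with ⟨k, hk⟩
    exact ⟨k, hk⟩
  -- A's rescan of l uses the dict lookup, which agrees with the count on l
  have hA : l.find? (fun c => d.getD c 0 == m) = some k := by
    rw [pv_find?_congr _ _ l (fun c _ => by rw [hgetD c]), hk]
  -- assemble (the ports' lets zeta-reduce; the counting fold is the Counter)
  have hfold : l.foldl (fun d c => d.insert c (d.getD c 0 + 1))
      (PySem.Dict.empty : PySem.Dict Char Int) = d := (pv_fold_counter l).trans hd.symm
  have eqA : highestFrequencyChar value = String.ofList [k] := by
    simp only [highestFrequencyChar]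
    simp only [← hl]
    rw [hfold, hm]
    simp only [hA]
  have eqB : highestFrequencyChar_alt value = String.ofList [k] := by
    simp only [highestFrequencyChar_alt]
    simp only [← hl]
    rw [hB, hk]
  rw [eqA, eqB]
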